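-- pv_equiv track=rewrite | github.com/sudhir-01-11/infosec-sudhir | newLang.py | skip_to_else_or_end
-- ===== SOURCE A (Python) =====
-- def skip_to_else_or_end(code_lines, index):
--     level = 1
--     index += 1
--     while index < len(code_lines):
--         head = code_lines[index].split(maxsplit=1)[0]
--         if head == "if":
--             level += 1
--         elif head == "endif":
--             level -= 1
--             if level == 0:
--                 return index + 1
--         elif head == "else" and level == 1:
--             return index + 1
--         index += 1
--     return index
-- ===== SOURCE B (Python) =====
-- def _skip_block(code_lines, i):
--     # i is the index of the first line inside a nested "if" block:
--     # return the index just past its matching "endif" (nested "else" is ignored),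
--     # or len(code_lines) if the block never closes.
--     n = len(code_lines)
--     while i < n:
--         head = code_lines[i].split(maxsplit=1)[0]
--         if head == "if":
--             i = _skip_block(code_lines, i + 1)
--         elif head == "endif":
--             return i + 1
--         else:
--             i += 1
--     return i
--
--
-- def skip_to_else_or_end(code_lines, index):
--     n = len(code_lines)
--     index += 1
--     while index < n:
--         head = code_lines[index].split(maxsplit=1)[0]
--         if head == "if":
--             index = _skip_block(code_lines, index + 1)
--         elif head == "else" or head == "endif":
--             return index + 1
--         else:
--             index += 1
--     return index
-- ===== Notes on version B (the rewrite author's own statement) =====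
-- stated objective: alternative
-- what changed: Replaces the running integer nesting-depth counter with structural recursion over nested blocks: a helper recursively skips a whole nested if..endif block (recursing on inner ifs, ignoring inner elses), and the main loop only ever looks at top-level heads.
-- outside the precondition, e.g. on skip_to_else_or_end(['if x', 'endif', '   '], 0): A returns 2, B returns 2; on skip_to_else_or_end(['endif', 'x'], -3): A returns -1, B returns -1
import Mathlib
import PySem

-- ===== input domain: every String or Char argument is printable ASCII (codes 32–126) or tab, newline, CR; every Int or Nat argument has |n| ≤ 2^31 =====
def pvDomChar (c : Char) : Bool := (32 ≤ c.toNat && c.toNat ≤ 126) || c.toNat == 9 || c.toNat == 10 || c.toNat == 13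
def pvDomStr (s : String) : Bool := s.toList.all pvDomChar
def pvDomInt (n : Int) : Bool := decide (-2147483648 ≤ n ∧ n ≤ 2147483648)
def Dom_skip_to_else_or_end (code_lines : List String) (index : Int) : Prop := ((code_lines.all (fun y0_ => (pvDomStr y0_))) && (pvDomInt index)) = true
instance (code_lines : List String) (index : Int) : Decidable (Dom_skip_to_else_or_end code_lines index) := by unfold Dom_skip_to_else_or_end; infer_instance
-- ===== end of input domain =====

-- B replaces A's integer nesting-depth counter by structural recursion over nested blocks
-- (a helper skips one whole nested if..endif block); objective: alternative (same cost).

-- shared head extraction: code_lines[index].split(maxsplit=1)[0];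
-- the .getD "" default is only reached outside Pre_ (Python raises IndexError there)
def pvHead (code_lines : List String) (i : Int) : String :=
  (PySem.Str.split₀Max (PySem.List.pyGetD code_lines i "") 1).headD ""

-- ===== PORT A =====
-- A's while loop with the running level counter, state (level, index)
def skipA (code_lines : List String) (level : Int) (index : Int) : Int :=
  if h : index < (code_lines.length : Int) then
    let head := pvHead code_lines index
    if head = "if" then skipA code_lines (level + 1) (index + 1)
    else if head = "endif" then
      (if level - 1 = 0 then index + 1 else skipA code_lines (level - 1) (index + 1))
    else if head = "else" ∧ level = 1 then index + 1
    else skipA code_lines level (index + 1)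
  else index
termination_by ((code_lines.length : Int) - index).toNat
decreasing_by all_goals omega

def skip_to_else_or_end (code_lines : List String) (index : Int) : Int :=
  skipA code_lines 1 (index + 1)

-- ===== PORT B =====
-- _skip_block; the subtype return value carries 'i ≤ result', needed only for termination
def skipBlockS (code_lines : List String) (i : Int) : { j : Int // i ≤ j } :=
  if h : i < (code_lines.length : Int) then
    let head := pvHead code_lines i
    if head = "if" then
      let ⟨j, hj⟩ := skipBlockS code_lines (i + 1)
      let ⟨k, hk⟩ := skipBlockS code_lines j
      ⟨k, by omega⟩
    else if head = "endif" then ⟨i + 1, by omega⟩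
    else
      let ⟨k, hk⟩ := skipBlockS code_lines (i + 1)
      ⟨k, by omega⟩
  else ⟨i, le_refl i⟩
termination_by ((code_lines.length : Int) - i).toNat
decreasing_by all_goals omega

def skipBlock (code_lines : List String) (i : Int) : Int :=
  (skipBlockS code_lines i).1

-- the main while loop of B
def loopB (code_lines : List String) (i : Int) : Int :=
  if h : i < (code_lines.length : Int) then
    let head := pvHead code_lines i
    if head = "if" then loopB code_lines (skipBlock code_lines (i + 1))
    else if head = "else" ∨ head = "endif" then i + 1
    else loopB code_lines (i + 1)
  else i
termination_by ((code_lines.length : Int) - i).toNat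
decreasing_by
  · have := (skipBlockS code_lines (i + 1)).2
    simp only [skipBlock]
    omega
  · omega

def skip_to_else_or_end_alt (code_lines : List String) (index : Int) : Int :=
  loopB code_lines (index + 1)

-- ===== PRECONDITION & SPEC =====
-- Pre_ excludes indices below -1 (Python's negative indexing wraps or raises IndexError
-- there) and inputs with an all-whitespace line at a position after index (A raises
-- IndexError on split(maxsplit=1)[0] when it scans one); this closed form necessarily
-- also excludes inputs where such a line or wrapped index lies beyond the point where
-- the scan returns — B scans in the same order, so both programs behave alike there.
def Pre_skip_to_else_or_end (code_lines : List String) (index : Int) : Prop :=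
  -1 ≤ index ∧ ∀ p ∈ code_lines.zipIdx, index < (p.2 : Int) → PySem.Str.strip p.1 ≠ ""
instance (code_lines : List String) (index : Int) : Decidable (Pre_skip_to_else_or_end code_lines index) := by unfold Pre_skip_to_else_or_end; infer_instance

def pvWitness_skip_to_else_or_end : List String × Int :=
  (["if x", "print hi", "endif", "else y", "endif"], 0)

def Spec_skip_to_else_or_end (code_lines : List String) (index : Int) (out : Int) : Prop := out = skip_to_else_or_end_alt code_lines index
instance (code_lines : List String) (index : Int) (out : Int) : Decidable (Spec_skip_to_else_or_end code_lines index out) := by unfold Spec_skip_to_else_or_end; infer_instance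

-- ===== CLAIM (what is proved, stated in full; the proofs are below) =====
def Claim_equal_skip_to_else_or_end : Prop := ∀ (code_lines : List String) (index : Int), Dom_skip_to_else_or_end code_lines index → Pre_skip_to_else_or_end code_lines index → Spec_skip_to_else_or_end code_lines index (skip_to_else_or_end code_lines index)

-- ===== LEMMAS AND PROOFS =====

theorem skipA_stop (code_lines : List String) (level i : Int)
    (h : ¬ i < (code_lines.length : Int)) : skipA code_lines level i = i := by
  rw [skipA]; simp [h]

theorem skipBlock_ge (code_lines : List String) (i : Int) : i ≤ skipBlock code_lines i :=
  (skipBlockS code_lines i).2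

-- skipBlock's one-step unfoldings
theorem skipBlock_stop (code_lines : List String) (i : Int)
    (h : ¬ i < (code_lines.length : Int)) : skipBlock code_lines i = i := by
  simp only [skipBlock]; rw [skipBlockS]; simp [h]

theorem skipBlock_if (code_lines : List String) (i : Int)
    (h : i < (code_lines.length : Int)) (hh : pvHead code_lines i = "if") :
    skipBlock code_lines i = skipBlock code_lines (skipBlock code_lines (i + 1)) := by
  simp only [skipBlock]; rw [skipBlockS]; simp [h, hh]

theorem skipBlock_endif (code_lines : List String) (i : Int)
    (h : i < (code_lines.length : Int)) (hh : pvHead code_lines i = "endif") :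
    skipBlock code_lines i = i + 1 := by
  simp only [skipBlock]; rw [skipBlockS]; simp [h, hh]

theorem skipBlock_other (code_lines : List String) (i : Int)
    (h : i < (code_lines.length : Int)) (h1 : pvHead code_lines i ≠ "if")
    (h2 : pvHead code_lines i ≠ "endif") :
    skipBlock code_lines i = skipBlock code_lines (i + 1) := by
  simp only [skipBlock]; rw [skipBlockS]; simp [h, h1, h2]

-- A at level lvl+1 first skips one whole block, then continues at level lvl
theorem skipA_shift (code_lines : List String) : ∀ (n : Nat) (i lvl : Int),
    ((code_lines.length : Int) - i).toNat ≤ n → 1 ≤ lvl →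
    skipA code_lines (lvl + 1) i = skipA code_lines lvl (skipBlock code_lines i) := by
  intro n
  induction n with
  | zero =>
    intro i lvl hn _
    have h : ¬ i < (code_lines.length : Int) := by omega
    rw [skipBlock_stop code_lines i h, skipA_stop, skipA_stop] <;> exact h
  | succ m ih =>
    intro i lvl hn hlvl
    by_cases h : i < (code_lines.length : Int)
    · by_cases hif : pvHead code_lines i = "if"
      · rw [skipA, skipBlock_if code_lines i h hif]
        simp only [h, dite_true, hif, if_true]
        have h1 : skipA code_lines (lvl + 1 + 1) (i + 1)
            = skipA code_lines (lvl + 1) (skipBlock code_lines (i + 1)) :=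
          ih (i + 1) (lvl + 1) (by omega) (by omega)
        have hge := skipBlock_ge code_lines (i + 1)
        have h2 : skipA code_lines (lvl + 1) (skipBlock code_lines (i + 1))
            = skipA code_lines lvl (skipBlock code_lines (skipBlock code_lines (i + 1))) :=
          ih (skipBlock code_lines (i + 1)) lvl (by omega) hlvl
        rw [h1, h2]
      · by_cases hend : pvHead code_lines i = "endif"
        · rw [skipA, skipBlock_endif code_lines i h hend]
          simp [h, hend]
          intro h0; exfalso; omega
        · rw [skipA, skipBlock_other code_lines i h hif hend]
          have hne : ¬ (pvHead code_lines i = "else" ∧ lvl + 1 = 1) := by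
            rintro ⟨_, h1⟩; omega
          simp only [h, dite_true, hif, if_false, hend, if_false, hne, if_false]
          exact ih (i + 1) lvl (by omega) hlvl
    · rw [skipBlock_stop code_lines i h, skipA_stop, skipA_stop] <;> exact h

-- A at level 1 is B's main loop
theorem skipA_eq_loopB (code_lines : List String) : ∀ (n : Nat) (i : Int),
    ((code_lines.length : Int) - i).toNat ≤ n →
    skipA code_lines 1 i = loopB code_lines i := by
  intro n
  induction n with
  | zero =>
    intro i hn
    have h : ¬ i < (code_lines.length : Int) := by omega
    rw [skipA, loopB]; simp [h]
  | succ m ih =>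
    intro i hn
    by_cases h : i < (code_lines.length : Int)
    · by_cases hif : pvHead code_lines i = "if"
      · rw [skipA, loopB]
        simp only [h, dite_true, hif, if_true]
        have h1 : skipA code_lines (1 + 1) (i + 1)
            = skipA code_lines 1 (skipBlock code_lines (i + 1)) :=
          skipA_shift code_lines m (i + 1) 1 (by omega) (by omega)
        have hge := skipBlock_ge code_lines (i + 1)
        have h2 := ih (skipBlock code_lines (i + 1)) (by omega)
        rw [h1, h2]
      · by_cases hend : pvHead code_lines i = "endif"
        · rw [skipA, loopB]
          simp [h, hend]
        · by_cases hel : pvHead code_lines i = "else"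
          · rw [skipA, loopB]
            simp [h, hel]
          · rw [skipA, loopB]
            simp only [h, dite_true, if_neg hif, if_neg hend]
            rw [if_neg (by rintro ⟨h1, _⟩; exact hel h1),
              if_neg (by rintro (h1 | h1); exacts [hel h1, hend h1])]
            exact ih (i + 1) (by omega)
    · rw [skipA_stop code_lines 1 i h, loopB]; simp [h]

-- ===== VERDICT (by name: the statement is the Claim_ definition above) =====
theorem skip_to_else_or_end_spec : Claim_equal_skip_to_else_or_end := by
  intro code_lines index _ _
  unfold Spec_skip_to_else_or_end skip_to_else_or_end skip_to_else_or_end_alt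
  exact skipA_eq_loopB code_lines ((code_lines.length : Int) - (index + 1)).toNat
    (index + 1) (le_refl _)
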